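-- pv_equiv track=rewrite | github.com/theblackhat55/options_algo_v2 | src/options_algo_v2/services/decision_diagnostics.py | count_soft_penalty_reasons
-- ===== SOURCE A (Python) =====
-- def count_soft_penalty_reasons(serialized_decisions) -> dict[str, int]:
--     counts: dict[str, int] = {}
--     for item in serialized_decisions:
--         reasons = item.get("soft_penalty_reasons")
--         if not isinstance(reasons, list):
--             continue
--         for reason in reasons:
--             key = str(reason)
--             counts[key] = counts.get(key, 0) + 1
--     return dict(sorted(counts.items()))
-- ===== SOURCE B (Python) =====
-- def count_soft_penalty_reasons(serialized_decisions) -> dict[str, int]: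
--     # Flatten all valid reason strings, sort once, then count consecutive runs.
--     flat = []
--     for item in serialized_decisions:
--         reasons = item.get("soft_penalty_reasons")
--         if isinstance(reasons, list):
--             for reason in reasons:
--                 flat.append(str(reason))
--     flat.sort()
--     groups = []
--     cur = None
--     n = 0
--     for key in flat:
--         if key == cur:
--             n += 1
--         else:
--             if n:
--                 groups.append((cur, n))
--             cur, n = key, 1
--     if n:
--         groups.append((cur, n))
--     return dict(groups)
-- ===== Notes on version B (the rewrite author's own statement) =====
-- stated objective: alternative
-- what changed: Replaces hash-table counting plus a final sort of the count dict by flattening all reason strings into one list, sorting it once, and counting consecutive equal runs in a single scan that emits the result directly in sorted order.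
import Mathlib
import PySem

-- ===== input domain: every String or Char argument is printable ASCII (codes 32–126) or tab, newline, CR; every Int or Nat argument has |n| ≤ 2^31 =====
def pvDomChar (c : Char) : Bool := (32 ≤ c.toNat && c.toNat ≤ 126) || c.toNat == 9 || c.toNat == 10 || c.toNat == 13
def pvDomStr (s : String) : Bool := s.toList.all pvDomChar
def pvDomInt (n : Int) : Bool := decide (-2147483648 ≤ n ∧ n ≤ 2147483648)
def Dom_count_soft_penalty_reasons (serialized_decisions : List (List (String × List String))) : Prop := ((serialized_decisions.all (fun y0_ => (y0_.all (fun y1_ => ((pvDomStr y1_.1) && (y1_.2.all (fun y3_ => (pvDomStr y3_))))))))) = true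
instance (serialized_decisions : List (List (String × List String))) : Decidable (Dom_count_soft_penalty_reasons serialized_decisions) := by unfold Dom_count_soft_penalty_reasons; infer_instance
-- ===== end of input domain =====

-- B replaces A's hash-table counting + final sort of the count dict by one sorted flat list of
-- reasons scanned once for consecutive runs (alternative decomposition, similar cost).

-- ===== PORT A =====
-- Under the type convention each item is an association list String × List String, so a present
-- "soft_penalty_reasons" value is always a list (isinstance passes) and str(reason) is the identity;
-- a missing key (Python None) fails the isinstance guard → the none branch.
def count_soft_penalty_reasons (serialized_decisions : List (List (String × List String))) : List (String × Int) :=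
  let counts : PySem.Dict String Int :=
    serialized_decisions.foldl (fun counts item =>
      match (PySem.Dict.mk item).get? "soft_penalty_reasons" with
      | none => counts
      | some reasons =>
          reasons.foldl (fun counts key => counts.insert key (counts.getD key 0 + 1)) counts)
      PySem.Dict.empty
  -- sorted(counts.items()) compares (str, int) pairs lexicographically; dict keys are distinct, so
  -- the int component is never consulted — sorting by the key component is exact here
  (PySem.Dict.ofList (PySem.List.sorted counts.items (fun p => p.1) false)).items

-- ===== PORT B =====
-- cur : Option String ports Python's `cur = None` sentinel; whenever n ≠ 0 holds, cur is some _,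
-- so `cur.getD ""` is exact for the flush `groups.append((cur, n))`.
def count_soft_penalty_reasons_alt (serialized_decisions : List (List (String × List String))) : List (String × Int) :=
  let flat : List String :=
    serialized_decisions.foldl (fun flat item =>
      match (PySem.Dict.mk item).get? "soft_penalty_reasons" with
      | none => flat
      | some reasons => reasons.foldl (fun flat reason => flat ++ [reason]) flat) []
  let s := PySem.List.sorted flat (fun x => x) false
  let fin := s.foldl (fun (st : List (String × Int) × Option String × Int) key =>
      if some key == st.2.1 then (st.1, st.2.1, st.2.2 + 1)
      else ((if st.2.2 ≠ 0 then st.1 ++ [(st.2.1.getD "", st.2.2)] else st.1), some key, 1))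
    ([], none, 0)
  let groups := if fin.2.2 ≠ 0 then fin.1 ++ [(fin.2.1.getD "", fin.2.2)] else fin.1
  (PySem.Dict.ofList groups).items

-- ===== PRECONDITION & SPEC =====
def Spec_count_soft_penalty_reasons (serialized_decisions : List (List (String × List String))) (out : List (String × Int)) : Prop := out = count_soft_penalty_reasons_alt serialized_decisions
instance (serialized_decisions : List (List (String × List String))) (out : List (String × Int)) : Decidable (Spec_count_soft_penalty_reasons serialized_decisions out) := by unfold Spec_count_soft_penalty_reasons; infer_instance

-- ===== CLAIM (what is proved, stated in full; the proofs are below) =====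
def Claim_equal_count_soft_penalty_reasons : Prop := ∀ (serialized_decisions : List (List (String × List String))), Dom_count_soft_penalty_reasons serialized_decisions → Spec_count_soft_penalty_reasons serialized_decisions (count_soft_penalty_reasons serialized_decisions)

-- ===== LEMMAS AND PROOFS =====

-- the multiset of reason strings both programs consume, in A's traversal order
def pvFlat (sd : List (List (String × List String))) : List String :=
  sd.flatMap (fun item => ((PySem.Dict.mk item).get? "soft_penalty_reasons").getD [])

-- reference form of B's run-counting scan (proof helper)
def pvGrp : String → Int → List String → List (String × Int)
  | c, n, [] => [(c, n)]
  | c, n, x :: s => if x = c then pvGrp c (n + 1) s else (c, n) :: pvGrp x 1 s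

theorem pv_countsA (sd : List (List (String × List String))) (d : PySem.Dict String Int) :
    sd.foldl (fun counts item =>
      match (PySem.Dict.mk item).get? "soft_penalty_reasons" with
      | none => counts
      | some reasons =>
          reasons.foldl (fun counts key => counts.insert key (counts.getD key 0 + 1)) counts) d
    = (pvFlat sd).foldl (fun c k => c.insert k (c.getD k 0 + 1)) d := by
  induction sd generalizing d with
  | nil => simp [pvFlat]
  | cons item sd ih =>
    simp only [pvFlat, List.flatMap_cons, List.foldl_append, List.foldl_cons] at *
    cases (PySem.Dict.mk item).get? "soft_penalty_reasons" with
    | none => simp [ih]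
    | some rs => simp [ih]

theorem pv_flatB (sd : List (List (String × List String))) (acc : List String) :
    sd.foldl (fun flat item =>
      match (PySem.Dict.mk item).get? "soft_penalty_reasons" with
      | none => flat
      | some reasons => reasons.foldl (fun flat reason => flat ++ [reason]) flat) acc
    = acc ++ pvFlat sd := by
  induction sd generalizing acc with
  | nil => simp [pvFlat]
  | cons item sd ih =>
    simp only [pvFlat, List.flatMap_cons, List.foldl_cons] at *
    cases (PySem.Dict.mk item).get? "soft_penalty_reasons" with
    | none => rw [ih]; simp
    | some rs =>
      rw [ih]
      simp only [Option.getD_some, ← List.append_assoc]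
      rw [PySem.List.foldl_append_singleton_eq_self]

theorem pv_runGrp (s : List String) (groups : List (String × Int)) (c : String) (n : Int)
    (hn : 1 ≤ n) :
    (let fin := s.foldl (fun (st : List (String × Int) × Option String × Int) key =>
        if some key == st.2.1 then (st.1, st.2.1, st.2.2 + 1)
        else ((if st.2.2 ≠ 0 then st.1 ++ [(st.2.1.getD "", st.2.2)] else st.1), some key, 1))
      (groups, some c, n)
     if fin.2.2 ≠ 0 then fin.1 ++ [(fin.2.1.getD "", fin.2.2)] else fin.1)
    = groups ++ pvGrp c n s := by
  induction s generalizing groups c n with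
  | nil =>
    simp only [List.foldl_nil]
    rw [if_pos (show n ≠ 0 by omega)]
    simp [pvGrp]
  | cons x s ih =>
    by_cases hx : x = c
    · subst hx
      have hbc : (some x == some x) = true := by simp
      simp only [List.foldl_cons, hbc, if_true, pvGrp]
      exact ih groups x (n + 1) (by omega)
    · have hbc : (some x == some c) = false := by simp [hx]
      simp only [List.foldl_cons, hbc, Bool.false_eq_true, if_false]
      rw [if_pos (show n ≠ 0 by omega)]
      have h2 := ih (groups ++ [(c, n)]) x 1 (by omega)
      simp only [Option.getD_some] at h2 ⊢
      rw [h2, List.append_assoc]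
      simp [pvGrp, hx]

theorem pv_grpEq (s : List String) (c : String) (n : Int)
    (hs : s.Pairwise (· ≤ ·)) (hc : ∀ x ∈ s, c ≤ x) :
    pvGrp c n s = (c, n + (s.count c : Int)) ::
      ((PySem.Set.ofList s).discard c).map (fun k => (k, (s.count k : Int))) := by
  induction s generalizing c n with
  | nil => simp [pvGrp, PySem.Set.ofList, PySem.Set.discard]
  | cons x s ih =>
    have hxs : ∀ y ∈ s, x ≤ y := fun y hy => (List.pairwise_cons.mp hs).1 y hy
    have hs' : s.Pairwise (· ≤ ·) := (List.pairwise_cons.mp hs).2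
    by_cases hx : x = c
    · subst hx
      rw [show pvGrp x n (x :: s) = pvGrp x (n + 1) s from by simp [pvGrp],
        ih x (n + 1) hs' hxs]
      refine List.cons_eq_cons.mpr ⟨?_, ?_⟩
      · have : (x :: s).count x = s.count x + 1 := by simp
        rw [this]
        simp [Prod.ext_iff]
        ring
      · have hset : (PySem.Set.ofList (x :: s)).discard x = (PySem.Set.ofList s).discard x := by
          simp [PySem.Set.ofList_cons, PySem.Set.discard, List.filter_filter]
        rw [hset]
        apply List.map_congr_left
        intro k hk
        have hkc : k ≠ x := by have := List.of_mem_filter hk; simpa using this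
        simp [Ne.symm hkc]
    · have hcx : c < x := lt_of_le_of_ne (hc x (List.mem_cons_self)) (Ne.symm hx)
      have hcnot : c ∉ x :: s := by
        intro hmem
        rcases List.mem_cons.mp hmem with h | h
        · exact hx h.symm
        · exact lt_irrefl c (lt_of_lt_of_le hcx (hxs c h))
      rw [show pvGrp c n (x :: s) = (c, n) :: pvGrp x 1 s from by simp [pvGrp, hx],
        ih x 1 hs' hxs]
      refine List.cons_eq_cons.mpr ⟨?_, ?_⟩
      · have : (x :: s).count c = 0 := List.count_eq_zero.mpr hcnot
        rw [this]
        simp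
      · have hcnotS : c ∉ (PySem.Set.ofList s).discard x := by
          intro hmem
          have : c ∈ s := (PySem.Set.mem_ofList s c).mp (List.mem_of_mem_filter hmem)
          exact hcnot (List.mem_cons_of_mem _ this)
        have hset : (PySem.Set.ofList (x :: s)).discard c
            = x :: (PySem.Set.ofList s).discard x := by
          rw [PySem.Set.ofList_cons]
          show List.filter _ _ = _
          rw [List.filter_cons_of_pos (by simp [hx]), List.filter_eq_self.mpr]
          intro a ha
          have hac : a ≠ c := fun h => hcnotS (h ▸ ha)
          simp [hac]
        rw [hset, List.map_cons]
        refine List.cons_eq_cons.mpr ⟨?_, ?_⟩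
        · have : (x :: s).count x = s.count x + 1 := by simp
          rw [this]
          simp [Prod.ext_iff]
          ring
        · apply List.map_congr_left
          intro k hk
          have hkx : k ≠ x := by have := List.of_mem_filter hk; simpa using this
          simp [Ne.symm hkx]

-- two strictly increasing reorderings coincide: first occurrences of a ≤-sorted list are <-sorted
theorem pv_ofList_sorted_lt (s : List String) (hs : s.Pairwise (· ≤ ·)) :
    (PySem.Set.ofList s).Pairwise (· < ·) := by
  induction s with
  | nil => simp [PySem.Set.ofList]
  | cons x s ih =>
    have hxs : ∀ y ∈ s, x ≤ y := fun y hy => (List.pairwise_cons.mp hs).1 y hy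
    have hs' := (List.pairwise_cons.mp hs).2
    rw [PySem.Set.ofList_cons]
    refine List.pairwise_cons.mpr ⟨?_, ?_⟩
    · intro y hy
      have hyne : y ≠ x := by
        have := List.of_mem_filter hy
        simpa using this
      have hymem : y ∈ PySem.Set.ofList s := List.mem_of_mem_filter hy
      exact lt_of_le_of_ne (hxs y ((PySem.Set.mem_ofList s y).mp hymem)) (Ne.symm hyne)
    · exact List.Pairwise.sublist List.filter_sublist (ih hs')

-- B's group list equals A's sorted count-map, over the common flat list
theorem pv_main (sd : List (List (String × List String))) :
    count_soft_penalty_reasons sd = count_soft_penalty_reasons_alt sd := by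
  simp only [count_soft_penalty_reasons, count_soft_penalty_reasons_alt]
  rw [pv_countsA sd PySem.Dict.empty, PySem.Dict.foldl_insert_getD_add_one_eq_counter,
    PySem.Dict.items_counter, pv_flatB sd []]
  simp only [List.nil_append]
  -- abbreviations
  generalize hF : pvFlat sd = F
  have hsp : (PySem.List.sorted F (fun x => x) false).Pairwise (· ≤ ·) :=
    PySem.List.sorted_pairwise F (fun x => x)
  have hperm : (PySem.Set.ofList (PySem.List.sorted F (fun x => x) false)).Perm
      (PySem.Set.ofList F) := by
    rw [List.perm_ext_iff_of_nodup (PySem.Set.nodup_ofList _) (PySem.Set.nodup_ofList _)]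
    intro a
    simp [PySem.Set.mem_ofList, (PySem.List.sorted_perm F (fun x => x) false).mem_iff]
  have hcnt : ∀ k, (PySem.List.sorted F (fun x => x) false).count k = F.count k :=
    fun k => (PySem.List.sorted_perm F (fun x => x) false).count_eq k
  -- A's sorted item list is the map over the sorted key set
  have hsorted : PySem.List.sorted
        ((PySem.Set.ofList F).map (fun k => (k, (F.count k : Int)))) (fun p => p.1) false
      = (PySem.Set.ofList (PySem.List.sorted F (fun x => x) false)).map
          (fun k => (k, (F.count k : Int))) := by
    apply PySem.List.sorted_eq_of_perm_of_pairwise_lt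
    · exact List.Perm.map _ hperm
    · exact List.pairwise_map.mpr (pv_ofList_sorted_lt _ hsp)
  rw [hsorted]
  set s := PySem.List.sorted F (fun x => x) false with hsdef
  -- B's grouping scan produces exactly that list
  have hgroups :
      (let fin := s.foldl (fun (st : List (String × Int) × Option String × Int) key =>
          if some key == st.2.1 then (st.1, st.2.1, st.2.2 + 1)
          else ((if st.2.2 ≠ 0 then st.1 ++ [(st.2.1.getD "", st.2.2)] else st.1), some key, 1))
        ([], none, 0)
       if fin.2.2 ≠ 0 then fin.1 ++ [(fin.2.1.getD "", fin.2.2)] else fin.1)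
      = (PySem.Set.ofList s).map (fun k => (k, (F.count k : Int))) := by
    cases hcs : s with
    | nil => simp [PySem.Set.ofList]
    | cons x t =>
      have hsp' : (x :: t).Pairwise (· ≤ ·) := hcs ▸ hsp
      have hxt : ∀ y ∈ t, x ≤ y := fun y hy => (List.pairwise_cons.mp hsp').1 y hy
      have ht : t.Pairwise (· ≤ ·) := (List.pairwise_cons.mp hsp').2
      simp only [List.foldl_cons]
      rw [if_neg (show ¬((some x == (none : Option String)) = true) by simp)]
      rw [if_neg (show ¬((0 : Int) ≠ 0) by simp)]
      have hrun := pv_runGrp t [] x 1 (by omega)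
      simp only [List.nil_append] at hrun
      rw [hrun, pv_grpEq t x 1 ht hxt, PySem.Set.ofList_cons, List.map_cons]
      refine List.cons_eq_cons.mpr ⟨?_, ?_⟩
      · have : (x :: t).count x = t.count x + 1 := by simp
        simp [Prod.ext_iff]
        rw [show F.count x = s.count x from (hcnt x).symm, hcs, this]
        push_cast
        ring
      · apply List.map_congr_left
        intro k hk
        have hkx : k ≠ x := by have := List.of_mem_filter hk; simpa using this
        rw [show F.count k = s.count k from (hcnt k).symm, hcs]
        simp [Ne.symm hkx]
  rw [hgroups]

-- ===== VERDICT (by name: the statement is the Claim_ definition above) =====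
theorem count_soft_penalty_reasons_spec : Claim_equal_count_soft_penalty_reasons := by
  intro sd _
  unfold Spec_count_soft_penalty_reasons
  exact pv_main sd
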